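-- pv_equiv track=rewrite | github.com/thinkSharp/meta_coding_puzzles | level_1_1_cafeteria.py | getMaxAdditionalDinersCount2
-- ===== SOURCE A (Python) =====
-- from typing import List
-- from collections import defaultdict
--
-- def getMaxAdditionalDinersCount2(N: int, K: int, M: int, S: List[int]) -> int:
--   # Write your code here
--   if N == 1:
--     return 1 if M == 0 else 0
--
--   occupied = defaultdict(bool)
--   for i in S:
--     occupied[i-1] = True
--
--   count = 0
--
--   for i in range(0, N):
--     if not occupied[i]:
--       left , right = True, True
--       for j in range(1,K+1):
--         if i-j >= 0 and occupied[i-j]: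
--           left = False
--         if i+j <= N-1 and occupied[i+j]:
--           right = False
--       if left and right:
--         count +=1
--         occupied[i] = True
--
--   return count
-- ===== SOURCE B (Python) =====
-- from typing import List
--
-- def getMaxAdditionalDinersCount2(N: int, K: int, M: int, S: List[int]) -> int:
--   # One-seat row is decided by M, as the API specifies.
--   if N == 1:
--     return 1 if M == 0 else 0
--   occ = {x - 1 for x in S if 1 <= x <= N}   # in-range occupied seats, 0-indexed
--   occ_sorted = sorted(occ)
--   count = 0
--   last = -K - 1          # position of nearest occupied/seated seat to the left (sentinel: far away)
--   idx = 0                # index of first element of occ_sorted greater than i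
--   for i in range(N):
--     while idx < len(occ_sorted) and occ_sorted[idx] <= i:
--       idx += 1
--     if i in occ:
--       last = i
--     elif i - last > K and (idx == len(occ_sorted) or occ_sorted[idx] - i > K):
--       count += 1
--       last = i
--   return count
-- ===== Notes on version B (the rewrite author's own statement) =====
-- stated objective: faster
-- what changed: A rescans up to K neighbouring seats for every seat (O(N*K)); B makes a single pass keeping the position of the nearest occupied/seated seat to the left and a pointer into the sorted list of occupied seats for the nearest one to the right, so the inner K-scan disappears (O(N + M log M)).
import Mathlib
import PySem

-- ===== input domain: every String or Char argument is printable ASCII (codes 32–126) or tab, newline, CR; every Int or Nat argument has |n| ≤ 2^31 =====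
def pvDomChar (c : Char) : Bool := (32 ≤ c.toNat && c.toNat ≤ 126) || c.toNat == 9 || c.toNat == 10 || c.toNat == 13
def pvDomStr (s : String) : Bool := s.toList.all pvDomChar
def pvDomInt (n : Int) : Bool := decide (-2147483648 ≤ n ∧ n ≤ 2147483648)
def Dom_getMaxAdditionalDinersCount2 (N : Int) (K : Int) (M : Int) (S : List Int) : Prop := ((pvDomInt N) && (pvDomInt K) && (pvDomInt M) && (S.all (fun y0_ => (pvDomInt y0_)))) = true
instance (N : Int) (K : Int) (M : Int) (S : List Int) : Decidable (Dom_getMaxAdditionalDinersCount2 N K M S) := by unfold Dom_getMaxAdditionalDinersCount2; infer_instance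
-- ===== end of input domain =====

-- B replaces A's per-seat scan of the K neighbours by a running 'last occupied' position and a
-- sorted-occupied-seats pointer, turning O(N*K) into O(N + M log M); same return value everywhere.

-- ===== PORT A =====
-- the inner 'for j in range(1, K+1)' loop computing the (left, right) flags
def pvA_inner (d : PySem.Dict Int Bool) (N K i : Int) : Bool × Bool :=
  (PySem.List.pyRange 1 (K + 1) 1).foldl
    (fun lr j =>
      let l := if decide (i - j ≥ 0) && d.getD (i - j) false then false else lr.1
      let r := if decide (i + j ≤ N - 1) && d.getD (i + j) false then false else lr.2
      (l, r))
    (true, true)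

-- one iteration of 'for i in range(0, N)'; state = (count, occupied).
-- defaultdict(bool): a read of a missing key yields False (the key insertion a defaultdict read
-- performs is unobservable through further reads, so getD _ false is exact).
def pvA_step (N K : Int) (st : Int × PySem.Dict Int Bool) (i : Int) : Int × PySem.Dict Int Bool :=
  if !(st.2.getD i false) then
    let lr := pvA_inner st.2 N K i
    if lr.1 && lr.2 then (st.1 + 1, st.2.insert i true) else st
  else st

def getMaxAdditionalDinersCount2 (N : Int) (K : Int) (M : Int) (S : List Int) : Int :=
  if N == 1 then (if M == 0 then 1 else 0)
  else
    let occupied := S.foldl (fun d i => d.insert (i - 1) true) PySem.Dict.empty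
    ((PySem.List.pyRange 0 N 1).foldl (pvA_step N K) (0, occupied)).1

-- ===== PORT B =====
-- one iteration of 'for i in range(N)'; state = (count, last, rest) where rest = occ_sorted[idx:]
-- (the integer pointer idx of Source B is represented by the remaining suffix of occ_sorted;
-- the 'while' advancing idx past elements ≤ i is that suffix's dropWhile).
def pvB_step (K : Int) (occ : PySem.Set Int) (st : Int × Int × List Int) (i : Int) : Int × Int × List Int :=
  let rest := st.2.2.dropWhile (fun k => decide (k ≤ i))
  if PySem.Set.contains occ i then (st.1, i, rest)
  else if decide (i - st.2.1 > K) && (match rest with | [] => true | k :: _ => decide (k - i > K)) then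
    (st.1 + 1, i, rest)
  else (st.1, st.2.1, rest)

def getMaxAdditionalDinersCount2_alt (N : Int) (K : Int) (M : Int) (S : List Int) : Int :=
  if N == 1 then (if M == 0 then 1 else 0)
  else
    let occ := PySem.Set.ofList ((S.filter (fun x => decide (1 ≤ x) && decide (x ≤ N))).map (fun x => x - 1))
    let occSorted := PySem.List.sorted occ (fun x => x) false
    ((PySem.List.pyRange 0 N 1).foldl (pvB_step K occ) (0, -K - 1, occSorted)).1

-- ===== PRECONDITION & SPEC =====
def Spec_getMaxAdditionalDinersCount2 (N : Int) (K : Int) (M : Int) (S : List Int) (out : Int) : Prop := out = getMaxAdditionalDinersCount2_alt N K M S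
instance (N : Int) (K : Int) (M : Int) (S : List Int) (out : Int) : Decidable (Spec_getMaxAdditionalDinersCount2 N K M S out) := by unfold Spec_getMaxAdditionalDinersCount2; infer_instance

-- ===== CLAIM (what is proved, stated in full; the proofs are below) =====
def Claim_equal_getMaxAdditionalDinersCount2 : Prop := ∀ (N : Int) (K : Int) (M : Int) (S : List Int), Dom_getMaxAdditionalDinersCount2 N K M S → Spec_getMaxAdditionalDinersCount2 N K M S (getMaxAdditionalDinersCount2 N K M S)

-- ===== LEMMAS AND PROOFS =====

-- abbreviations for the two loop states after the first n iterations
def pvD0 (S : List Int) : PySem.Dict Int Bool :=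
  S.foldl (fun d i => d.insert (i - 1) true) PySem.Dict.empty
def pvOcc (N : Int) (S : List Int) : PySem.Set Int :=
  PySem.Set.ofList ((S.filter (fun x => decide (1 ≤ x) && decide (x ≤ N))).map (fun x => x - 1))
def pvOs (N : Int) (S : List Int) : List Int :=
  PySem.List.sorted (pvOcc N S) (fun x => x) false
def pvA (N K : Int) (S : List Int) (n : Nat) : Int × PySem.Dict Int Bool :=
  (PySem.List.pyRange 0 (n : Int) 1).foldl (pvA_step N K) (0, pvD0 S)
def pvB (N K : Int) (S : List Int) (n : Nat) : Int × Int × List Int :=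
  (PySem.List.pyRange 0 (n : Int) 1).foldl (pvB_step K (pvOcc N S)) (0, -K - 1, pvOs N S)

theorem getD_pvD0_aux (S : List Int) (d : PySem.Dict Int Bool) (k : Int) :
    (S.foldl (fun d i => d.insert (i - 1) true) d).getD k false
      = (d.getD k false || decide ((k + 1) ∈ S)) := by
  induction S generalizing d with
  | nil => simp
  | cons x xs ih =>
    rw [List.foldl_cons, ih, PySem.Dict.getD_insert]
    by_cases h : k + 1 = x
    · have hk : k = x - 1 := by omega
      simp [hk]
    · have hk : ¬ (k = x - 1) := by omega
      simp [hk, h]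

theorem getD_pvD0 (S : List Int) (k : Int) :
    (pvD0 S).getD k false = decide ((k + 1) ∈ S) := by
  unfold pvD0
  rw [getD_pvD0_aux]
  simp

theorem mem_pvOs (N : Int) (S : List Int) (k : Int) :
    k ∈ pvOs N S ↔ ((k + 1) ∈ S ∧ 0 ≤ k ∧ k ≤ N - 1) := by
  unfold pvOs pvOcc
  rw [PySem.List.mem_sorted, PySem.Set.mem_ofList]
  simp only [List.mem_map, List.mem_filter, Bool.and_eq_true, decide_eq_true_eq]
  constructor
  · rintro ⟨x, ⟨hx, hx1, hx2⟩, rfl⟩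
    refine ⟨by simpa using hx, by omega, by omega⟩
  · rintro ⟨h1, h2, h3⟩
    exact ⟨k + 1, ⟨h1, by omega, by omega⟩, by ring⟩

theorem pairwise_pvOs (N : Int) (S : List Int) : (pvOs N S).Pairwise (· < ·) := by
  unfold pvOs pvOcc
  exact PySem.List.sorted_ofList_pairwise_lt _

theorem dropWhile_pairwise (m : Int) (xs : List Int) (h : xs.Pairwise (· < ·)) :
    xs.dropWhile (fun k => decide (k ≤ m)) = xs.filter (fun k => decide (m < k)) := by
  induction xs with
  | nil => simp
  | cons x xs ih =>
    rcases List.pairwise_cons.mp h with ⟨hx, hxs⟩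
    by_cases hxm : x ≤ m
    · rw [List.dropWhile_cons_of_pos (by simpa using hxm),
        List.filter_cons_of_neg (by simpa using (by omega : ¬ m < x))]
      exact ih hxs
    · rw [List.dropWhile_cons_of_neg (by simpa using hxm),
        List.filter_cons_of_pos (by simpa using (by omega : m < x))]
      have : xs.filter (fun k => decide (m < k)) = xs :=
        List.filter_eq_self.mpr (fun a ha => by
          have := hx a ha
          simp only [decide_eq_true_eq]
          omega)
      rw [this]

theorem pv_foldl_flags (d : PySem.Dict Int Bool) (N i : Int) (js : List Int) (l0 r0 : Bool) :
    js.foldl (fun lr j =>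
      let l := if decide (i - j ≥ 0) && d.getD (i - j) false then false else lr.1
      let r := if decide (i + j ≤ N - 1) && d.getD (i + j) false then false else lr.2
      (l, r)) (l0, r0)
      = (l0 && !js.any (fun j => decide (i - j ≥ 0) && d.getD (i - j) false),
         r0 && !js.any (fun j => decide (i + j ≤ N - 1) && d.getD (i + j) false)) := by
  induction js generalizing l0 r0 with
  | nil => simp
  | cons j js ih =>
    simp only [List.foldl_cons, List.any_cons]
    rw [ih]
    cases h1 : decide (i - j ≥ 0) && d.getD (i - j) false <;>
      cases h2 : decide (i + j ≤ N - 1) && d.getD (i + j) false <;>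
        simp

theorem pvA_inner_any (d : PySem.Dict Int Bool) (N K i : Int) :
    pvA_inner d N K i
      = (!(PySem.List.pyRange 1 (K + 1) 1).any (fun j => decide (i - j ≥ 0) && d.getD (i - j) false),
         !(PySem.List.pyRange 1 (K + 1) 1).any (fun j => decide (i + j ≤ N - 1) && d.getD (i + j) false)) := by
  unfold pvA_inner
  rw [pv_foldl_flags]
  simp

theorem pvA_succ (N K : Int) (S : List Int) (n : Nat) :
    pvA N K S (n + 1) = pvA_step N K (pvA N K S n) (n : Int) := by
  unfold pvA
  have h0 : ((n + 1 : Nat) : Int) = (n : Int) + 1 := by push_cast; ring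
  rw [h0, PySem.List.pyRange_one_succ_right (by exact_mod_cast Nat.zero_le n),
    List.foldl_append, List.foldl_cons, List.foldl_nil]

theorem pvB_succ (N K : Int) (S : List Int) (n : Nat) :
    pvB N K S (n + 1) = pvB_step K (pvOcc N S) (pvB N K S n) (n : Int) := by
  unfold pvB
  have h0 : ((n + 1 : Nat) : Int) = (n : Int) + 1 := by push_cast; ring
  rw [h0, PySem.List.pyRange_one_succ_right (by exact_mod_cast Nat.zero_le n),
    List.foldl_append, List.foldl_cons, List.foldl_nil]

theorem pv_inv (N K : Int) (S : List Int) (n : Nat) (hn : (n : Int) ≤ N) :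
    (pvA N K S n).1 = (pvB N K S n).1
  ∧ (∀ k : Int, (n : Int) ≤ k → (pvA N K S n).2.getD k false = (pvD0 S).getD k false)
  ∧ (∀ k : Int, (pvB N K S n).2.1 < k → 0 ≤ k → k < (n : Int) → (pvA N K S n).2.getD k false = false)
  ∧ ((pvB N K S n).2.1 = -K - 1 ∨
      (0 ≤ (pvB N K S n).2.1 ∧ (pvB N K S n).2.1 < (n : Int) ∧ (pvA N K S n).2.getD ((pvB N K S n).2.1) false = true))
  ∧ (pvB N K S n).2.2 = (pvOs N S).filter (fun k => decide ((n : Int) - 1 < k)) := by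
  induction n with
  | zero =>
    have hA0 : pvA N K S 0 = (0, pvD0 S) := by
      unfold pvA
      rw [Nat.cast_zero, PySem.List.pyRange_one_eq_nil le_rfl, List.foldl_nil]
    have hB0 : pvB N K S 0 = (0, -K - 1, pvOs N S) := by
      unfold pvB
      rw [Nat.cast_zero, PySem.List.pyRange_one_eq_nil le_rfl, List.foldl_nil]
    rw [hA0, hB0]
    refine ⟨rfl, fun k _ => rfl, ?_, Or.inl rfl, ?_⟩
    · intro k _ h2 h3
      simp only [Nat.cast_zero] at h3
      omega
    · symm
      apply List.filter_eq_self.mpr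
      intro a ha
      have := ((mem_pvOs N S a).mp ha).2.1
      simp only [decide_eq_true_eq, Nat.cast_zero]
      omega
  | succ n ih =>
    have hn' : (n : Int) ≤ N := by push_cast at hn ⊢; omega
    have hnN : (n : Int) ≤ N - 1 := by push_cast at hn; omega
    obtain ⟨ih1, ih2, ih3, ih4, ih5⟩ := ih hn'
    rcases hA : pvA N K S n with ⟨cA, d⟩
    rcases hB : pvB N K S n with ⟨cB, last, rest⟩
    rw [hA] at ih1 ih2 ih3
    rw [hB] at ih1 ih3 ih4 ih5
    rw [hA] at ih4
    dsimp only at ih1 ih2 ih3 ih4 ih5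
    set i : Int := (n : Int) with hi
    have hi0 : 0 ≤ i := Int.natCast_nonneg n
    -- the advanced pointer
    have hpw : rest.Pairwise (· < ·) := by
      rw [ih5]; exact (pairwise_pvOs N S).filter _
    have hrest' : rest.dropWhile (fun k => decide (k ≤ i)) = (pvOs N S).filter (fun k => decide (i < k)) := by
      rw [dropWhile_pairwise _ _ hpw, ih5, List.filter_filter]
      apply List.filter_congr
      intro a _
      by_cases h : i < a
      · simp [h, show i - 1 < a from by omega]
      · simp [h]
    have hgetDi : d.getD i false = decide ((i + 1) ∈ S) := by
      rw [ih2 i le_rfl, getD_pvD0]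
    have hmemOcc : ∀ k : Int, k ∈ pvOcc N S ↔ k ∈ pvOs N S := by
      intro k
      unfold pvOs
      rw [PySem.List.mem_sorted]
    have hcont : PySem.Set.contains (pvOcc N S) i = decide (i ∈ pvOs N S) := by
      by_cases hm : i ∈ pvOs N S
      · rw [(PySem.Set.contains_iff _ _).mpr ((hmemOcc i).mpr hm)]
        simp [hm]
      · have hnm : i ∉ pvOcc N S := fun h => hm ((hmemOcc i).mp h)
        simp only [hm, decide_false]
        exact (Bool.not_eq_true _).mp (fun h => hnm ((PySem.Set.contains_iff _ _).mp h))
    rw [pvA_succ, pvB_succ, hA, hB]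
    by_cases hocc : i ∈ pvOs N S
    · -- seat i is originally occupied: A skips, B records last := i
      obtain ⟨hS, _, _⟩ := (mem_pvOs N S i).mp hocc
      have hd : d.getD i false = true := by rw [hgetDi]; simp [hS]
      have hAstep : pvA_step N K (cA, d) i = (cA, d) := by
        simp [pvA_step, hd]
      have hBstep : pvB_step K (pvOcc N S) (cB, last, rest) i
          = (cB, i, (pvOs N S).filter (fun k => decide (i < k))) := by
        simp only [pvB_step, hrest', hcont, hocc, decide_true, if_pos]
      rw [hAstep, hBstep]
      dsimp only
      refine ⟨ih1, ?_, ?_, ?_, ?_⟩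
      · intro k hk
        push_cast at hk
        exact ih2 k (by omega)
      · intro k h1 _ h3
        push_cast at h3
        exfalso; omega
      · refine Or.inr ⟨hi0, by push_cast; omega, hd⟩
      · apply List.filter_congr
        intro a _
        rw [decide_eq_decide]
        push_cast
        omega
    · -- seat i is free
      have hnS : (i + 1) ∉ S := by
        intro hS
        exact hocc ((mem_pvOs N S i).mpr ⟨hS, hi0, hnN⟩)
      have hd : d.getD i false = false := by rw [hgetDi]; simp [hnS]
      -- characterise the left flag
      have iffL : ((PySem.List.pyRange 1 (K + 1) 1).any
            (fun j => decide (i - j ≥ 0) && d.getD (i - j) false) = true) ↔ (i - last ≤ K) := by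
        rw [List.any_eq_true]
        constructor
        · rintro ⟨j, hj, hcondj⟩
          rw [PySem.List.mem_pyRange_one] at hj
          simp only [Bool.and_eq_true, decide_eq_true_eq] at hcondj
          by_contra hgt
          have hk3 := ih3 (i - j) (by omega) (by omega) (by omega)
          rw [hk3] at hcondj
          simp at hcondj
        · intro hle
          rcases ih4 with h4 | ⟨h4a, h4b, h4c⟩
          · omega
          · refine ⟨i - last, by rw [PySem.List.mem_pyRange_one]; omega, ?_⟩
            have he : i - (i - last) = last := by ring
            simp only [he, h4c, Bool.and_true, decide_eq_true_eq]
            omega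
      have hleft : (!(PySem.List.pyRange 1 (K + 1) 1).any
            (fun j => decide (i - j ≥ 0) && d.getD (i - j) false)) = decide (i - last > K) := by
        cases hany : (PySem.List.pyRange 1 (K + 1) 1).any
            (fun j => decide (i - j ≥ 0) && d.getD (i - j) false) with
        | true =>
          have hle := iffL.mp hany
          simp [show ¬ (i - last > K) from by omega]
        | false =>
          have hc : i - last > K := by
            by_contra hc
            have h2 : _ = true := iffL.mpr (by omega)
            rw [h2] at hany
            cases hany
          simp [hc]
      -- characterise the right flag
      have iffR : ((PySem.List.pyRange 1 (K + 1) 1).any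
            (fun j => decide (i + j ≤ N - 1) && d.getD (i + j) false) = true)
          ↔ (∃ k ∈ pvOs N S, i < k ∧ k - i ≤ K) := by
        rw [List.any_eq_true]
        constructor
        · rintro ⟨j, hj, hcondj⟩
          rw [PySem.List.mem_pyRange_one] at hj
          simp only [Bool.and_eq_true, decide_eq_true_eq] at hcondj
          obtain ⟨hb, hocc2⟩ := hcondj
          rw [ih2 (i + j) (by omega), getD_pvD0] at hocc2
          simp only [decide_eq_true_eq] at hocc2
          exact ⟨i + j, (mem_pvOs N S _).mpr ⟨hocc2, by omega, hb⟩, by omega, by omega⟩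
        · rintro ⟨k, hk, hik, hkK⟩
          obtain ⟨hkS, hk0, hkN⟩ := (mem_pvOs N S k).mp hk
          refine ⟨k - i, by rw [PySem.List.mem_pyRange_one]; omega, ?_⟩
          have he : i + (k - i) = k := by ring
          rw [he, ih2 k (by omega), getD_pvD0]
          simp only [Bool.and_eq_true, decide_eq_true_eq]
          exact ⟨hkN, hkS⟩
      have hright : (!(PySem.List.pyRange 1 (K + 1) 1).any
            (fun j => decide (i + j ≤ N - 1) && d.getD (i + j) false))
          = (match (pvOs N S).filter (fun k => decide (i < k)) with
             | [] => true
             | k :: _ => decide (k - i > K)) := by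
        rcases hflt : (pvOs N S).filter (fun k => decide (i < k)) with _ | ⟨k0, t⟩
        · cases hany : (PySem.List.pyRange 1 (K + 1) 1).any
              (fun j => decide (i + j ≤ N - 1) && d.getD (i + j) false) with
          | true =>
            exfalso
            obtain ⟨k, hk, hik, _⟩ := iffR.mp hany
            have hmem : k ∈ (pvOs N S).filter (fun k => decide (i < k)) :=
              List.mem_filter.mpr ⟨hk, by simpa using hik⟩
            rw [hflt] at hmem
            simp at hmem
          | false => simp
        · have hk0mem : k0 ∈ (pvOs N S).filter (fun k => decide (i < k)) := by
            rw [hflt]; exact List.mem_cons_self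
          obtain ⟨hk0Os, hk0i⟩ := List.mem_filter.mp hk0mem
          simp only [decide_eq_true_eq] at hk0i
          have hpwf : ((pvOs N S).filter (fun k => decide (i < k))).Pairwise (· < ·) :=
            (pairwise_pvOs N S).filter _
          rw [hflt] at hpwf
          have hmin : ∀ a ∈ t, k0 < a := (List.pairwise_cons.mp hpwf).1
          by_cases hc : k0 - i > K
          · cases hany : (PySem.List.pyRange 1 (K + 1) 1).any
                (fun j => decide (i + j ≤ N - 1) && d.getD (i + j) false) with
            | true =>
              exfalso
              obtain ⟨k, hk, hik, hkK⟩ := iffR.mp hany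
              have hkmem : k ∈ (pvOs N S).filter (fun k => decide (i < k)) :=
                List.mem_filter.mpr ⟨hk, by simpa using hik⟩
              rw [hflt] at hkmem
              rcases List.mem_cons.mp hkmem with rfl | hkt
              · omega
              · have := hmin k hkt; omega
            | false => simp [hc]
          · have h2 : _ = true := iffR.mpr ⟨k0, hk0Os, hk0i, by omega⟩
            rw [h2]
            simp [hc]
      -- both steps take the same decision
      have hAstep : pvA_step N K (cA, d) i
          = (if (decide (i - last > K) &&
                (match (pvOs N S).filter (fun k => decide (i < k)) with
                 | [] => true
                 | k :: _ => decide (k - i > K)))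
             then (cA + 1, d.insert i true) else (cA, d)) := by
        simp only [pvA_step, hd, Bool.not_false, if_true, pvA_inner_any, hleft, hright]
      have hBstep : pvB_step K (pvOcc N S) (cB, last, rest) i
          = (if (decide (i - last > K) &&
                (match (pvOs N S).filter (fun k => decide (i < k)) with
                 | [] => true
                 | k :: _ => decide (k - i > K)))
             then (cB + 1, i, (pvOs N S).filter (fun k => decide (i < k)))
             else (cB, last, (pvOs N S).filter (fun k => decide (i < k)))) := by
        simp only [pvB_step, hrest', hcont, hocc, decide_false, Bool.false_eq_true,
          not_false_eq_true, if_neg]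
      rw [hAstep, hBstep]
      by_cases hseat : (decide (i - last > K) &&
            (match (pvOs N S).filter (fun k => decide (i < k)) with
             | [] => true
             | k :: _ => decide (k - i > K))) = true
      · rw [if_pos hseat, if_pos hseat]
        dsimp only
        refine ⟨by rw [ih1], ?_, ?_, ?_, ?_⟩
        · intro k hk
          push_cast at hk
          rw [PySem.Dict.getD_insert, if_neg (by omega)]
          exact ih2 k (by omega)
        · intro k h1 h2 h3
          push_cast at h3
          exfalso; omega
        · refine Or.inr ⟨hi0, by push_cast; omega, ?_⟩
          rw [PySem.Dict.getD_insert, if_pos rfl]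
        · apply List.filter_congr
          intro a _
          rw [decide_eq_decide]
          push_cast
          omega
      · rw [if_neg hseat, if_neg hseat]
        dsimp only
        refine ⟨ih1, ?_, ?_, ?_, ?_⟩
        · intro k hk
          push_cast at hk
          exact ih2 k (by omega)
        · intro k h1 h2 h3
          push_cast at h3
          by_cases hki : k = i
          · rw [hki]; exact hd
          · exact ih3 k h1 h2 (by omega)
        · rcases ih4 with h4 | ⟨h4a, h4b, h4c⟩
          · exact Or.inl h4
          · exact Or.inr ⟨h4a, by push_cast; omega, h4c⟩
        · apply List.filter_congr
          intro a _
          rw [decide_eq_decide]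
          push_cast
          omega

-- ===== VERDICT (by name: the statement is the Claim_ definition above) =====
theorem getMaxAdditionalDinersCount2_spec : Claim_equal_getMaxAdditionalDinersCount2 := by
  unfold Claim_equal_getMaxAdditionalDinersCount2 Spec_getMaxAdditionalDinersCount2
  intro N K M S _
  unfold getMaxAdditionalDinersCount2 getMaxAdditionalDinersCount2_alt
  by_cases h1 : N = 1
  · simp [h1]
  · simp only [beq_iff_eq, h1, if_false]
    by_cases h0 : 0 ≤ N
    · have hmain := (pv_inv N K S N.toNat (by rw [Int.toNat_of_nonneg h0])).1
      unfold pvA pvB pvD0 pvOcc pvOs at hmain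
      rw [Int.toNat_of_nonneg h0] at hmain
      exact hmain
    · rw [PySem.List.pyRange_one_eq_nil (by omega)]
      simp
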